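-- pv_equiv track=rewrite | github.com/JeanLouisParent/Nasa-Transcript-Processor | src/ocr/parsing/block_builder.py | _normalize_embedded_groups
-- ===== SOURCE A (Python) =====
-- def _normalize_embedded_groups(groups: tuple[str, str, str, str]) -> str:
--     def norm(token: str) -> str:
--         token = token.replace("O", "0").replace("o", "0")
--         token = token.replace("I", "1").replace("i", "1").replace("l", "1")
--         token = token.replace("C", "0").replace("c", "0")
--         token = token.replace("S", "5").replace("s", "5")
--         token = token.replace("B", "8").replace("b", "8")
--         if len(token) == 1:
--             token = f"0{token}"
--         return token
--
--     parts = [norm(g) for g in groups]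
--     return " ".join(parts)
-- ===== SOURCE B (Python) =====
-- _MAP = {"O": "0", "o": "0", "I": "1", "i": "1", "l": "1",
--         "C": "0", "c": "0", "S": "5", "s": "5", "B": "8", "b": "8"}
--
--
-- def _normalize_embedded_groups(groups: tuple[str, str, str, str]) -> str:
--     def norm(token: str) -> str:
--         out = "".join(_MAP.get(ch, ch) for ch in token)
--         return "0" + out if len(out) == 1 else out
--
--     return " ".join(norm(g) for g in groups)
-- ===== Notes on version B (the rewrite author's own statement) =====
-- stated objective: simpler
-- what changed: Replaces the chain of ten whole-string .replace scans with a single char-by-char pass over each token using one char-to-digit mapping dict.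
import Mathlib
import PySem

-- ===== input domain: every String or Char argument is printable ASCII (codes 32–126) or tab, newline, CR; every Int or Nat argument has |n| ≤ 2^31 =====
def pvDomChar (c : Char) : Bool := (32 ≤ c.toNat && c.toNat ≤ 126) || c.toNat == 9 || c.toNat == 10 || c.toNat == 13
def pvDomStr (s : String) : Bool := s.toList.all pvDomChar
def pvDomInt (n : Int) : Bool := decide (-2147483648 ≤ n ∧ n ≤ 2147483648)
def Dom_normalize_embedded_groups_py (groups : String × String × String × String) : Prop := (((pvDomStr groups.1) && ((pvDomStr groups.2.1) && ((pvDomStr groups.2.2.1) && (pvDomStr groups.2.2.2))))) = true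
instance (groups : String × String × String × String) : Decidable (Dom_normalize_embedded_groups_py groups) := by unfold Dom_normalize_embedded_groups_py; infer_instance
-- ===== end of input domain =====

-- B replaces A's chain of ten whole-string .replace passes with one char-by-char pass
-- through a single char→digit mapping (objective: simpler).

-- ===== PORT A =====
-- norm: ten sequential .replace calls, then zero-pad a length-1 token.
def pvNormA (token : String) : String :=
  let t1 := PySem.Str.replace token "O" "0"
  let t2 := PySem.Str.replace t1 "o" "0"
  let t3 := PySem.Str.replace t2 "I" "1"
  let t4 := PySem.Str.replace t3 "i" "1"
  let t5 := PySem.Str.replace t4 "l" "1"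
  let t6 := PySem.Str.replace t5 "C" "0"
  let t7 := PySem.Str.replace t6 "c" "0"
  let t8 := PySem.Str.replace t7 "S" "5"
  let t9 := PySem.Str.replace t8 "s" "5"
  let t10 := PySem.Str.replace t9 "B" "8"
  let t11 := PySem.Str.replace t10 "b" "8"
  -- f"0{token}" is string concatenation; ported exactly as joining the two pieces
  if PySem.Str.len t11 == 1 then PySem.Str.join "" ["0", t11] else t11

def normalize_embedded_groups_py (groups : String × String × String × String) : String :=
  PySem.Str.join " " [pvNormA groups.1, pvNormA groups.2.1, pvNormA groups.2.2.1, pvNormA groups.2.2.2]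

-- ===== PORT B =====
-- the module-level mapping dict _MAP of Source B
def pvMap : PySem.Dict Char Char :=
  PySem.Dict.ofList
  [('O', '0'), ('o', '0'), ('I', '1'), ('i', '1'), ('l', '1'),
   ('C', '0'), ('c', '0'), ('S', '5'), ('s', '5'), ('B', '8'), ('b', '8')]

-- norm: one pass, mapping.get(ch, ch) per character, then the same zero-pad.
def pvNormB (token : String) : String :=
  let out := String.ofList (token.toList.map (fun ch => PySem.Dict.getD pvMap ch ch))
  if PySem.Str.len out == 1 then PySem.Str.join "" ["0", out] else out

def normalize_embedded_groups_py_alt (groups : String × String × String × String) : String :=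
  PySem.Str.join " " [pvNormB groups.1, pvNormB groups.2.1, pvNormB groups.2.2.1, pvNormB groups.2.2.2]

-- ===== PRECONDITION & SPEC =====
def Spec_normalize_embedded_groups_py (groups : String × String × String × String) (out : String) : Prop := out = normalize_embedded_groups_py_alt groups
instance (groups : String × String × String × String) (out : String) : Decidable (Spec_normalize_embedded_groups_py groups out) := by unfold Spec_normalize_embedded_groups_py; infer_instance

-- ===== CLAIM (what is proved, stated in full; the proofs are below) =====
def Claim_equal_normalize_embedded_groups_py : Prop := ∀ (groups : String × String × String × String), Dom_normalize_embedded_groups_py groups → Spec_normalize_embedded_groups_py groups (normalize_embedded_groups_py groups)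

-- ===== LEMMAS AND PROOFS =====

-- single-character substitution, the per-character effect of one .replace pass
def pvSub (a b : Char) (c : Char) : Char := if c == a then b else c

-- replace.go with a single-char pattern is a map, given enough fuel
theorem replace_go_single (a b : Char) :
    ∀ (l : List Char) (fuel : Nat) (acc : List Char), l.length ≤ fuel →
      PySem.Chars.replace.go [a] [b] fuel l acc = acc.reverse ++ l.map (pvSub a b) := by
  intro l
  induction l with
  | nil =>
    intro fuel acc _
    cases fuel <;> simp [PySem.Chars.replace.go]
  | cons c t ih =>
    intro fuel acc h
    cases fuel with
    | zero => simp at h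
    | succ n =>
      simp only [PySem.Chars.replace.go, List.isPrefixOf]
      by_cases hc : a = c
      · subst hc
        rw [if_pos (by simp)]
        rw [show List.drop [a].length (a :: t) = t from rfl,
            ih n ([b].reverse ++ acc) (by simpa using h)]
        simp [pvSub]
      · rw [if_neg (by simp [hc])]
        rw [ih n (c :: acc) (by simpa using h)]
        simp [pvSub, Ne.symm hc]

theorem replace_single (s : List Char) (a b : Char) :
    PySem.Chars.replace s [a] [b] = s.map (pvSub a b) := by
  rw [PySem.Chars.replace]
  simp only [List.isEmpty_cons, if_neg, Bool.false_eq_true, not_false_iff]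
  simpa using replace_go_single a b s s.length [] le_rfl

-- one .replace pass with single-character arguments, at the String level
theorem step_single (s : String) (oa ob : String) (a b : Char)
    (ha : oa.toList = [a]) (hb : ob.toList = [b]) :
    (PySem.Str.replace s oa ob).toList = s.toList.map (pvSub a b) := by
  rw [PySem.Str.toList_replace, ha, hb, replace_single]

theorem pvMap_mk : pvMap = PySem.Dict.mk
    [('O', '0'), ('o', '0'), ('I', '1'), ('i', '1'), ('l', '1'),
     ('C', '0'), ('c', '0'), ('S', '5'), ('s', '5'), ('B', '8'), ('b', '8')] := by decide

-- the eleven-step character substitution chain equals B's table lookup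
theorem chain_eq_table (c : Char) :
    pvSub 'b' '8' (pvSub 'B' '8' (pvSub 's' '5' (pvSub 'S' '5' (pvSub 'c' '0'
      (pvSub 'C' '0' (pvSub 'l' '1' (pvSub 'i' '1' (pvSub 'I' '1' (pvSub 'o' '0'
        (pvSub 'O' '0' c))))))))))
      = PySem.Dict.getD pvMap c c := by
  rw [pvMap_mk]
  by_cases h1 : c = 'O'; · subst h1; decide
  by_cases h2 : c = 'o'; · subst h2; decide
  by_cases h3 : c = 'I'; · subst h3; decide
  by_cases h4 : c = 'i'; · subst h4; decide
  by_cases h5 : c = 'l'; · subst h5; decide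
  by_cases h6 : c = 'C'; · subst h6; decide
  by_cases h7 : c = 'c'; · subst h7; decide
  by_cases h8 : c = 'S'; · subst h8; decide
  by_cases h9 : c = 's'; · subst h9; decide
  by_cases h10 : c = 'B'; · subst h10; decide
  by_cases h11 : c = 'b'; · subst h11; decide
  simp only [pvSub, beq_iff_eq, h1, h2, h3, h4, h5, h6, h7, h8, h9, h10, h11,
    if_false, PySem.Dict.getD_eq_get?_getD, PySem.Dict.get?_mk_cons,
    Ne.symm h1, Ne.symm h2, Ne.symm h3, Ne.symm h4, Ne.symm h5, Ne.symm h6, Ne.symm h7,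
    Ne.symm h8, Ne.symm h9, Ne.symm h10, Ne.symm h11]
  simp [PySem.Dict.get?]

-- fusing the eleven map passes into B's single table-lookup pass
theorem maps_fuse (l : List Char) :
    ((((((((((l.map (pvSub 'O' '0')).map (pvSub 'o' '0')).map (pvSub 'I' '1')).map
      (pvSub 'i' '1')).map (pvSub 'l' '1')).map (pvSub 'C' '0')).map (pvSub 'c' '0')).map
      (pvSub 'S' '5')).map (pvSub 's' '5')).map (pvSub 'B' '8')).map (pvSub 'b' '8')
      = l.map (fun ch => PySem.Dict.getD pvMap ch ch) := by
  induction l with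
  | nil => simp
  | cons c t ih =>
    simp only [List.map_cons]
    rw [ih, chain_eq_table c]

theorem norm_eq (t : String) : pvNormA t = pvNormB t := by
  simp only [pvNormA, pvNormB]
  have hs : PySem.Str.replace (PySem.Str.replace (PySem.Str.replace (PySem.Str.replace
      (PySem.Str.replace (PySem.Str.replace (PySem.Str.replace (PySem.Str.replace
        (PySem.Str.replace (PySem.Str.replace (PySem.Str.replace t "O" "0") "o" "0")
          "I" "1") "i" "1") "l" "1") "C" "0") "c" "0") "S" "5") "s" "5") "B" "8") "b" "8"
      = String.ofList (t.toList.map (fun ch => PySem.Dict.getD pvMap ch ch)) := by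
    rw [← String.toList_inj, String.toList_ofList]
    rw [step_single _ "b" "8" 'b' '8' rfl rfl]
    rw [step_single _ "B" "8" 'B' '8' rfl rfl]
    rw [step_single _ "s" "5" 's' '5' rfl rfl]
    rw [step_single _ "S" "5" 'S' '5' rfl rfl]
    rw [step_single _ "c" "0" 'c' '0' rfl rfl]
    rw [step_single _ "C" "0" 'C' '0' rfl rfl]
    rw [step_single _ "l" "1" 'l' '1' rfl rfl]
    rw [step_single _ "i" "1" 'i' '1' rfl rfl]
    rw [step_single _ "I" "1" 'I' '1' rfl rfl]
    rw [step_single _ "o" "0" 'o' '0' rfl rfl]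
    rw [step_single _ "O" "0" 'O' '0' rfl rfl]
    exact maps_fuse t.toList
  rw [hs]

-- ===== VERDICT (by name: the statement is the Claim_ definition above) =====
theorem normalize_embedded_groups_py_spec : Claim_equal_normalize_embedded_groups_py := by
  intro g _
  show normalize_embedded_groups_py g = normalize_embedded_groups_py_alt g
  unfold normalize_embedded_groups_py normalize_embedded_groups_py_alt
  simp [norm_eq]
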